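-- pv_equiv track=rewrite | github.com/anderzzz/patent-concepts | db_maker.py | _fix_comma_special_cases_2
-- ===== SOURCE A (Python) =====
-- SPECIAL_ASS2 = ['JR', 'SR', 'Jr', 'Sr', 'jr', 'sr']
--
-- def _fix_comma_special_cases_2(x):
--     if not ',' in x:
--         return x
--     else:
--         for special_chars in SPECIAL_ASS2:
--             if ', {}'.format(special_chars) in x:
--                 x = x.replace(', {}'.format(special_chars), ' {}'.format(special_chars))
--         return x
-- ===== SOURCE B (Python) =====
-- # One left-to-right single-pass scan instead of six sequential full-string replace passes.
-- _SUFFIXES = ('JR', 'SR', 'Jr', 'Sr', 'jr', 'sr')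
--
-- def _fix_comma_special_cases_2(x):
--     out = []
--     i = 0
--     n = len(x)
--     while i < n:
--         if x[i] == ',' and x[i + 1:i + 2] == ' ' and x[i + 2:i + 4] in _SUFFIXES:
--             out.append(' ' + x[i + 2:i + 4])
--             i += 4
--         else:
--             out.append(x[i])
--             i += 1
--     return ''.join(out)
-- ===== Notes on version B (the rewrite author's own statement) =====
-- stated objective: alternative
-- what changed: Replaces A's six sequential full-string .replace passes (plus per-suffix containment tests) by a single left-to-right scan that drops the comma before each of the six name suffixes in one pass.
import Mathlib
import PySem

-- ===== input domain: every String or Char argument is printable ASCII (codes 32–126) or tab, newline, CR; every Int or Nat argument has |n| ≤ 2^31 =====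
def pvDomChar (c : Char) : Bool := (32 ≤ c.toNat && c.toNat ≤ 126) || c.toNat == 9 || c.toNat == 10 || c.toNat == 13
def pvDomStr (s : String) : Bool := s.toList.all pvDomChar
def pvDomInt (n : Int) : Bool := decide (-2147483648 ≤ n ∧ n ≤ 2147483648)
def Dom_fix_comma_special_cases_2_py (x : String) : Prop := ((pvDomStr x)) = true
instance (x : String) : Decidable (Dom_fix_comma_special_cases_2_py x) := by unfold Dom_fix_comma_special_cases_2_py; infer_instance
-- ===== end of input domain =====

-- B replaces A's six sequential full-string `.replace` passes by one left-to-right single-pass scan (alternative algorithm; same return value).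


-- ===== PORT A =====
def SPECIAL_ASS2 : List String := ["JR", "SR", "Jr", "Sr", "jr", "sr"]

def fix_comma_special_cases_2_py (x : String) : String :=
  if ¬ (PySem.Str.isIn "," x = true) then x
  else
    SPECIAL_ASS2.foldl (fun s special_chars =>
      if PySem.Str.isIn (", " ++ special_chars) s = true then
        PySem.Str.replace s (", " ++ special_chars) (" " ++ special_chars)
      else s) x

-- ===== PORT B =====
-- Source B's suffix-tuple membership test `x[i+2:i+4] in _SUFFIXES`
def isSuffixPair (a b : Char) : Bool :=
  (a = 'J' && b = 'R') || (a = 'S' && b = 'R') || (a = 'J' && b = 'r') ||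
  (a = 'S' && b = 'r') || (a = 'j' && b = 'r') || (a = 's' && b = 'r')

-- Source B's while loop: if the next 4 chars are ", <suffix>" emit " <suffix>" and advance 4,
-- else emit the char under the cursor and advance 1.
def scanFix : List Char → List Char
  | [] => []
  | c :: c1 :: a :: b :: t' =>
    if c = ',' ∧ c1 = ' ' ∧ isSuffixPair a b = true then ' ' :: a :: b :: scanFix t'
    else c :: scanFix (c1 :: a :: b :: t')
  | c :: t => c :: scanFix t

def fix_comma_special_cases_2_py_alt (x : String) : String :=
  String.ofList (scanFix x.toList)

-- ===== PRECONDITION & SPEC =====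
def Spec_fix_comma_special_cases_2_py (x : String) (out : String) : Prop := out = fix_comma_special_cases_2_py_alt x
instance (x : String) (out : String) : Decidable (Spec_fix_comma_special_cases_2_py x out) := by unfold Spec_fix_comma_special_cases_2_py; infer_instance

-- ===== CLAIM (what is proved, stated in full; the proofs are below) =====
def Claim_equal_fix_comma_special_cases_2_py : Prop := ∀ (x : String), Dom_fix_comma_special_cases_2_py x → Spec_fix_comma_special_cases_2_py x (fix_comma_special_cases_2_py x)

-- ===== LEMMAS AND PROOFS =====

-- clean structural model of Python's s.replace(", ab", " ab") (left-to-right, non-overlapping)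
def repl (a b : Char) : List Char → List Char
  | [] => []
  | c :: c1 :: x :: y :: t' =>
    if c = ',' ∧ c1 = ' ' ∧ x = a ∧ y = b then ' ' :: a :: b :: repl a b t'
    else c :: repl a b (c1 :: x :: y :: t')
  | c :: t => c :: repl a b t

-- the six suffixes, as (first,second) char pairs, in A's order
def sufPairs : List (Char × Char) :=
  [('J','R'), ('S','R'), ('J','r'), ('S','r'), ('j','r'), ('s','r')]

-- A's loop: the six replaces applied in sequence
def replAll (ps : List (Char × Char)) (l : List Char) : List Char :=
  ps.foldl (fun s p => repl p.1 p.2 s) l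

theorem repl_cons_of_no_match (a b c : Char) (t : List Char)
    (h : ¬ ∃ t', c = ',' ∧ t = ' ' :: a :: b :: t') :
    repl a b (c :: t) = c :: repl a b t := by
  match t with
  | [] => simp [repl]
  | [c1] => simp [repl]
  | [c1, x] => simp [repl]
  | c1 :: x :: y :: t' =>
    rw [repl, if_neg]
    rintro ⟨rfl, rfl, rfl, rfl⟩
    exact h ⟨t', rfl, rfl⟩

theorem repl_match (a b : Char) (t : List Char) :
    repl a b (',' :: ' ' :: a :: b :: t) = ' ' :: a :: b :: repl a b t := by
  simp [repl]

theorem repl_cons_of_head_ne (a b c : Char) (t : List Char) (hc : c ≠ ',') :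
    repl a b (c :: t) = c :: repl a b t := by
  apply repl_cons_of_no_match
  rintro ⟨t', rfl, rfl⟩
  exact hc rfl

-- PySem.Chars.replace.go with enough fuel computes the clean model
theorem replace_go_eq (a b : Char) (fuel : Nat) (l acc : List Char) (h : l.length ≤ fuel) :
    PySem.Chars.replace.go [',', ' ', a, b] [' ', a, b] fuel l acc = acc.reverse ++ repl a b l := by
  induction fuel generalizing l acc with
  | zero =>
    rw [List.length_eq_zero_iff.mp (Nat.le_zero.mp h)]
    rw [PySem.Chars.replace.go]
    simp [repl]
  | succ fuel ih =>
    match l with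
    | [] => rw [PySem.Chars.replace.go]; simp [repl]; omega
    | c :: t =>
      rw [PySem.Chars.replace.go]
      by_cases hp : List.isPrefixOf [',', ' ', a, b] (c :: t) = true
      · rw [if_pos hp]
        obtain ⟨t', ht⟩ := List.isPrefixOf_iff_prefix.mp hp
        simp only [List.cons_append, List.nil_append, List.cons.injEq] at ht
        obtain ⟨rfl, rfl, rfl, rfl, rfl⟩ := ht
        rw [ih _ _ (by simp at h ⊢; omega)]
        simp [repl]
      · rw [if_neg hp]
        rw [ih _ _ (by simp at h ⊢; omega)]
        rw [repl_cons_of_no_match]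
        · simp
        · rintro ⟨t', rfl, rfl⟩
          simp [List.isPrefixOf] at hp

theorem chars_replace_eq (a b : Char) (l : List Char) :
    PySem.Chars.replace l [',', ' ', a, b] [' ', a, b] = repl a b l := by
  simp [PySem.Chars.replace, replace_go_eq a b l.length l [] le_rfl]

theorem repl_id_of_not_infix (a b : Char) (l : List Char)
    (h : ¬ ([',', ' ', a, b] <:+: l)) : repl a b l = l := by
  induction l using repl.induct a b with
  | case1 => simp [repl]
  | case2 c c1 x y t' hcond ih =>
    obtain ⟨rfl, rfl, rfl, rfl⟩ := hcond
    exact absurd (List.infix_iff_prefix_suffix.mpr ⟨_, ⟨t', rfl⟩, List.suffix_rfl⟩) h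
  | case3 c c1 x y t' hcond ih =>
    rw [repl, if_neg hcond, ih (fun hi => h (hi.trans (List.suffix_cons c _).isInfix))]
  | case4 c t hshape ih =>
    have hs : repl a b (c :: t) = c :: repl a b t := by
      apply repl_cons_of_no_match
      rintro ⟨t', rfl, rfl⟩
      exact hshape ' ' a b t' rfl
    rw [hs, ih (fun hi => h (hi.trans (List.suffix_cons c _).isInfix))]

def charOK (ps : List (Char × Char)) : Prop :=
  ∀ p ∈ ps, p.1 ≠ ',' ∧ p.1 ≠ ' ' ∧ p.2 ≠ ',' ∧ p.2 ≠ ' '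

-- a " ab" prefix passes unchanged through the whole pipeline
theorem replAll_space_prefix (ps : List (Char × Char)) (a b : Char)
    (ha : a ≠ ',') (hb : b ≠ ',') (s : List Char) :
    replAll ps (' ' :: a :: b :: s) = ' ' :: a :: b :: replAll ps s := by
  induction ps generalizing s with
  | nil => rfl
  | cons p ps ih =>
    simp only [replAll, List.foldl_cons]
    rw [repl_cons_of_head_ne _ _ _ _ (by decide), repl_cons_of_head_ne _ _ _ _ ha,
        repl_cons_of_head_ne _ _ _ _ hb]
    exact ih _

-- a ", ab" prefix (ab one of the suffixes of the pipeline) is rewritten to " ab"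
theorem replAll_match (ps : List (Char × Char)) (a b : Char)
    (hok : charOK ps) (hmem : (a, b) ∈ ps) (t : List Char) :
    replAll ps (',' :: ' ' :: a :: b :: t) = ' ' :: a :: b :: replAll ps t := by
  induction ps generalizing t with
  | nil => cases hmem
  | cons p ps ih =>
    have ha : a ≠ ',' := (hok (a, b) hmem).1
    have hb : b ≠ ',' := (hok (a, b) hmem).2.2.1
    by_cases hp : p = (a, b)
    · subst hp
      show replAll ps (repl a b (',' :: ' ' :: a :: b :: t)) = _
      rw [repl_match, replAll_space_prefix ps a b ha hb]
      rfl
    · have hstep : repl p.1 p.2 (',' :: ' ' :: a :: b :: t)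
          = ',' :: ' ' :: a :: b :: repl p.1 p.2 t := by
        rw [repl_cons_of_no_match _ _ _ _ (by
              rintro ⟨t', -, heq⟩
              obtain ⟨h1, h2, -⟩ := by simpa using heq
              exact hp (Prod.ext h1.symm h2.symm)),
            repl_cons_of_head_ne _ _ _ _ (by decide),
            repl_cons_of_head_ne _ _ _ _ ha, repl_cons_of_head_ne _ _ _ _ hb]
      show replAll ps (repl p.1 p.2 (',' :: ' ' :: a :: b :: t)) = _
      rw [hstep, ih (fun q hq => hok q (List.mem_cons_of_mem p hq))
            (((List.mem_cons.mp hmem).resolve_left (fun h => hp (by simp [h]))))]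
      rfl

-- a non-match at position 0 stays a non-match after replacing a different pattern
theorem no_match_preserved (pa pb qa qb : Char) (hne : (pa, pb) ≠ (qa, qb))
    (hqa : qa ≠ ' ') (hqb : qb ≠ ' ') (t : List Char)
    (h : ¬ ∃ t', t = ' ' :: qa :: qb :: t') :
    ¬ ∃ t', repl pa pb t = ' ' :: qa :: qb :: t' := by
  rintro ⟨t', heq⟩
  match t with
  | [] => simp [repl] at heq
  | d :: t2 =>
    by_cases hm : ∃ u, d = ',' ∧ t2 = ' ' :: pa :: pb :: u
    · obtain ⟨u, rfl, rfl⟩ := hm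
      rw [repl_match] at heq
      obtain ⟨h1, h2, -⟩ : pa = qa ∧ pb = qb ∧ repl pa pb u = t' := by simpa using heq
      exact hne (by simp [h1, h2])
    · rw [repl_cons_of_no_match _ _ _ _ hm] at heq
      obtain ⟨rfl, heq2⟩ : d = ' ' ∧ repl pa pb t2 = qa :: qb :: t' := by simpa using heq
      have h2 : ¬ ∃ u, t2 = qa :: qb :: u := fun ⟨u, hu⟩ => h ⟨u, by rw [hu]⟩
      match t2 with
      | [] => simp [repl] at heq2
      | e :: t3 =>
        by_cases hm2 : ∃ u, e = ',' ∧ t3 = ' ' :: pa :: pb :: u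
        · obtain ⟨u, rfl, rfl⟩ := hm2
          rw [repl_match] at heq2
          obtain ⟨h1, -⟩ : ' ' = qa ∧ pa = qb ∧ pb :: repl pa pb u = t' := by simpa using heq2
          exact hqa h1.symm
        · rw [repl_cons_of_no_match _ _ _ _ hm2] at heq2
          obtain ⟨rfl, heq3⟩ : e = qa ∧ repl pa pb t3 = qb :: t' := by simpa using heq2
          have h3 : ¬ ∃ u, t3 = qb :: u := fun ⟨u, hu⟩ => h2 ⟨u, by rw [hu]⟩
          match t3 with
          | [] => simp [repl] at heq3
          | f :: t4 =>
            by_cases hm3 : ∃ u, f = ',' ∧ t4 = ' ' :: pa :: pb :: u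
            · obtain ⟨u, rfl, rfl⟩ := hm3
              rw [repl_match] at heq3
              obtain ⟨h1, -⟩ : ' ' = qb ∧ pa :: pb :: repl pa pb u = t' := by simpa using heq3
              exact hqb h1.symm
            · rw [repl_cons_of_no_match _ _ _ _ hm3] at heq3
              obtain ⟨rfl, -⟩ : f = qb ∧ repl pa pb t4 = t' := by simpa using heq3
              exact h3 ⟨t4, rfl⟩

-- a char that starts no ", <suffix>" of the pipeline passes unchanged through all of it
theorem replAll_no_match (ps : List (Char × Char)) (c : Char) (t : List Char)
    (hok : charOK ps) (hnd : ps.Pairwise (· ≠ ·))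
    (h : ∀ q ∈ ps, ¬ ∃ t', c = ',' ∧ t = ' ' :: q.1 :: q.2 :: t') :
    replAll ps (c :: t) = c :: replAll ps t := by
  induction ps generalizing t with
  | nil => rfl
  | cons p ps ih =>
    have hstep : repl p.1 p.2 (c :: t) = c :: repl p.1 p.2 t :=
      repl_cons_of_no_match _ _ _ _ (fun ⟨t', hc, ht⟩ => h p List.mem_cons_self ⟨t', hc, ht⟩)
    have hnext : ∀ q ∈ ps, ¬ ∃ t', c = ',' ∧ repl p.1 p.2 t = ' ' :: q.1 :: q.2 :: t' := by
      intro q hq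
      by_cases hc : c = ','
      · have hq' := hok q (List.mem_cons_of_mem p hq)
        have hpres := no_match_preserved p.1 p.2 q.1 q.2
          (fun he => List.rel_of_pairwise_cons hnd hq (by simpa using he))
          hq'.2.1 hq'.2.2.2 t
          (fun ⟨t', ht⟩ => h q (List.mem_cons_of_mem p hq) ⟨t', hc, ht⟩)
        rintro ⟨t', -, ht⟩
        exact hpres ⟨t', ht⟩
      · rintro ⟨t', hc', -⟩; exact hc hc'
    show replAll ps (repl p.1 p.2 (c :: t)) = _
    rw [hstep, ih (repl p.1 p.2 t) (fun q hq => hok q (List.mem_cons_of_mem p hq))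
      (List.Pairwise.of_cons hnd) hnext]
    rfl

theorem isSuffixPair_iff (a b : Char) : isSuffixPair a b = true ↔ (a, b) ∈ sufPairs := by
  simp [isSuffixPair, sufPairs, Prod.ext_iff]; tauto

theorem replAll_nil (ps : List (Char × Char)) : replAll ps [] = [] := by
  induction ps with
  | nil => rfl
  | cons p ps ih =>
    show replAll ps (repl p.1 p.2 []) = []
    rw [show repl p.1 p.2 [] = [] from rfl]
    exact ih

-- B's single scan computes A's six-pass pipeline
theorem scanFix_eq_replAll (l : List Char) : scanFix l = replAll sufPairs l := by
  induction l using scanFix.induct with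
  | case1 => rw [scanFix, replAll_nil]
  | case2 c c1 a b t' hcond ih =>
    obtain ⟨rfl, rfl, hsuf⟩ := hcond
    rw [scanFix, if_pos ⟨rfl, rfl, hsuf⟩, ih,
      replAll_match sufPairs a b (by unfold charOK; decide) ((isSuffixPair_iff a b).mp hsuf)]
  | case3 c c1 a b t' hcond ih =>
    rw [scanFix, if_neg hcond, ih]
    rw [replAll_no_match sufPairs c (c1 :: a :: b :: t') (by unfold charOK; decide) (by decide)]
    rintro q hq ⟨t'', rfl, heq⟩
    obtain ⟨rfl, rfl, rfl, -⟩ : c1 = ' ' ∧ a = q.1 ∧ b = q.2 ∧ t' = t'' := by simpa using heq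
    exact hcond ⟨rfl, rfl, (isSuffixPair_iff _ _).mpr (by simpa using hq)⟩
  | case4 c t hshape ih =>
    have hs : scanFix (c :: t) = c :: scanFix t := by
      match t, hshape with
      | [], _ => simp [scanFix]
      | [c1], _ => simp [scanFix]
      | [c1, x], _ => simp [scanFix]
      | c1 :: x :: y :: t', hshape => exact absurd (hshape c1 x y t' rfl) not_false
    rw [hs, ih]
    rw [replAll_no_match sufPairs c t (by unfold charOK; decide) (by decide)]
    rintro q hq ⟨t'', rfl, rfl⟩
    exact hshape ' ' q.1 q.2 t'' rfl

theorem scanFix_id_of_no_comma (l : List Char) (h : ',' ∉ l) : scanFix l = l := by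
  induction l using scanFix.induct with
  | case1 => rfl
  | case2 c c1 a b t' hcond ih => exact absurd (hcond.1 ▸ List.mem_cons_self) h
  | case3 c c1 a b t' hcond ih =>
    rw [scanFix, if_neg hcond, ih (fun hm => h (List.mem_cons_of_mem c hm))]
  | case4 c t hshape ih =>
    have hs : scanFix (c :: t) = c :: scanFix t := by
      match t, hshape with
      | [], _ => simp [scanFix]
      | [c1], _ => simp [scanFix]
      | [c1, x], _ => simp [scanFix]
      | c1 :: x :: y :: t', hshape => exact absurd (hshape c1 x y t' rfl) not_false
    rw [hs, ih (fun hm => h (List.mem_cons_of_mem c hm))]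

-- one branch of A's loop body, on char lists
theorem step_eq (a b : Char) (old new : String) (hold : old.toList = [',', ' ', a, b])
    (hnew : new.toList = [' ', a, b]) (s : String) :
    (if PySem.Str.isIn old s = true then PySem.Str.replace s old new else s).toList
      = repl a b s.toList := by
  by_cases hin : PySem.Str.isIn old s = true
  · rw [if_pos hin]
    show (String.ofList (PySem.Chars.replace s.toList old.toList new.toList)).toList = _
    rw [String.toList_ofList, hold, hnew, chars_replace_eq]
  · rw [if_neg hin]
    refine (repl_id_of_not_infix a b s.toList ?_).symm
    intro hinf
    exact hin ((PySem.Str.isIn_iff_infix _ _).mpr (hold ▸ hinf))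

-- A's whole loop, on char lists
theorem fold_toList (x : String) :
    (SPECIAL_ASS2.foldl (fun s special_chars =>
      if PySem.Str.isIn (", " ++ special_chars) s = true then
        PySem.Str.replace s (", " ++ special_chars) (" " ++ special_chars)
      else s) x).toList = replAll sufPairs x.toList := by
  simp only [SPECIAL_ASS2, List.foldl_cons, List.foldl_nil]
  rw [step_eq 's' 'r' _ _ (by decide) (by decide),
      step_eq 'j' 'r' _ _ (by decide) (by decide),
      step_eq 'S' 'r' _ _ (by decide) (by decide),
      step_eq 'J' 'r' _ _ (by decide) (by decide),
      step_eq 'S' 'R' _ _ (by decide) (by decide),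
      step_eq 'J' 'R' _ _ (by decide) (by decide)]
  rfl

-- ===== VERDICT (by name: the statement is the Claim_ definition above) =====
theorem fix_comma_special_cases_2_py_spec : Claim_equal_fix_comma_special_cases_2_py := by
  intro x _
  unfold Spec_fix_comma_special_cases_2_py fix_comma_special_cases_2_py fix_comma_special_cases_2_py_alt
  by_cases hin : PySem.Str.isIn "," x = true
  · rw [if_neg (by simpa using hin)]
    rw [scanFix_eq_replAll, ← fold_toList x, String.ofList_toList]
  · rw [if_pos (by simpa using hin)]
    rw [scanFix_id_of_no_comma x.toList (fun hm => hin ((PySem.Str.isIn_iff_infix _ _).mpr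
      (by simpa using (List.singleton_infix_iff ',' x.toList).mpr hm))),
      String.ofList_toList]
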